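-- pv_equiv track=rewrite | github.com/nishadtardalkar/moot_ensemble | pass_1.py | nearest_uniform_n_points
-- ===== SOURCE A (Python) =====
-- from math import comb
--
-- def nearest_uniform_n_points(n_obj, target):
--     if n_obj <= 1:
--         return max(2, target)
--
--     values = []
--     p = 1
--     while p <= 200:
--         n_points = comb(n_obj + p - 1, p)
--         values.append(n_points)
--         if n_points >= target:
--             break
--         p += 1
--     best = min(values, key=lambda x: (abs(x - target), -x))
--     return max(2, int(best))
-- ===== SOURCE B (Python) =====
-- from math import comb
--
-- def nearest_uniform_n_points(n_obj, target):
--     if n_obj <= 1: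
--         return max(2, target)
--     last = comb(n_obj + 199, 200)
--     if last < target:
--         return max(2, last)
--     lo, hi = 1, 200
--     while lo < hi:
--         mid = (lo + hi) // 2
--         if comb(n_obj + mid - 1, mid) >= target:
--             hi = mid
--         else:
--             lo = mid + 1
--     cur = comb(n_obj + lo - 1, lo)
--     if lo == 1:
--         return max(2, cur)
--     prev = comb(n_obj + lo - 2, lo - 1)
--     if abs(prev - target) < abs(cur - target):
--         return max(2, prev)
--     return max(2, cur)
-- ===== Notes on version B (the rewrite author's own statement) =====
-- stated objective: alternative
-- what changed: A scans p = 1..200 linearly, computing one binomial per step and finally taking a keyed min over the whole collected list; B binary-searches [1,200] for the first p whose binomial reaches target and compares only that value and its predecessor (fewer comb evaluations in the worst case, but both are sub-millisecond).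
import Mathlib
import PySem

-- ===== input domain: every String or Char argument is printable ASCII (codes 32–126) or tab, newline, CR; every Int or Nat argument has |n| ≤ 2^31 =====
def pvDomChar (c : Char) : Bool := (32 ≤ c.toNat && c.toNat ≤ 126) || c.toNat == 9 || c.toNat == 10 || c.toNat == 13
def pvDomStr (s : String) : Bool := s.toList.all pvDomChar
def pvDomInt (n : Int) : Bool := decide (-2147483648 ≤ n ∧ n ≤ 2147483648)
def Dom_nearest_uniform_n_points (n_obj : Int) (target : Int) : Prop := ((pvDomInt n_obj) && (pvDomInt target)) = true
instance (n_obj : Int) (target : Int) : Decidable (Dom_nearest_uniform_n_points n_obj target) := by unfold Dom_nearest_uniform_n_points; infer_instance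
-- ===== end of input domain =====

-- B replaces A's linear scan over p = 1..200 (one binomial per step, then a keyed min over the
-- collected list) by a binary search for the first p with comb(n_obj+p-1,p) >= target, comparing only that value and its predecessor (alternative algorithm; same return value).

-- ===== PORT A =====
-- math.comb(n, k); exact for 0 ≤ n, 0 ≤ k (every call below has n ≥ 1, k ≥ 1)
def pyComb (n k : Int) : Int := (Nat.choose n.toNat k.toNat : Int)

-- the while loop of A: p from 1 while p <= 200, appending comb(n_obj+p-1, p), breaking at >= target
def pvCombVals (n_obj target p : Int) (values : List Int) : List Int :=
  if _h : p ≤ 200 then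
    let n_points := pyComb (n_obj + p - 1) p
    let values' := values ++ [n_points]
    if target ≤ n_points then values' else pvCombVals n_obj target (p + 1) values'
  else values
termination_by (201 - p).toNat
decreasing_by omega

def nearest_uniform_n_points (n_obj : Int) (target : Int) : Int :=
  if n_obj ≤ 1 then max 2 target
  else
    let values := pvCombVals n_obj target 1 []
    -- min(values, key=lambda x: (abs(x - target), -x)); values is nonempty, so Python's min
    -- always returns here and the .getD default is unreachable
    let best := (PySem.List.min2? values (fun x => |x - target|) (fun x => -x)).getD 0
    max 2 best

-- ===== PORT B =====
-- the while loop of B: binary search for the smallest p in [lo, hi] with comb(n_obj+p-1, p) >= target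
def pvBSearch (n_obj target lo hi : Int) : Int :=
  if _h : lo < hi then
    let mid := PySem.Int.floordiv (lo + hi) 2
    if target ≤ pyComb (n_obj + mid - 1) mid then pvBSearch n_obj target lo mid
    else pvBSearch n_obj target (mid + 1) hi
  else lo
termination_by (hi - lo).toNat
decreasing_by
  · have hlt : PySem.Int.floordiv (lo + hi) 2 < hi :=
      (PySem.Int.floordiv_lt_iff_lt_mul (by norm_num)).2 (by omega)
    omega
  · have hb := PySem.Int.floordiv_two_mid_bounds (le_of_lt _h)
    omega

def nearest_uniform_n_points_alt (n_obj : Int) (target : Int) : Int :=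
  if n_obj ≤ 1 then max 2 target
  else
    let last := pyComb (n_obj + 199) 200
    if last < target then max 2 last
    else
      let lo := pvBSearch n_obj target 1 200
      let cur := pyComb (n_obj + lo - 1) lo
      if lo = 1 then max 2 cur
      else
        let prev := pyComb (n_obj + lo - 2) (lo - 1)
        if |prev - target| < |cur - target| then max 2 prev else max 2 cur

-- ===== PRECONDITION & SPEC =====
def Spec_nearest_uniform_n_points (n_obj : Int) (target : Int) (out : Int) : Prop := out = nearest_uniform_n_points_alt n_obj target
instance (n_obj : Int) (target : Int) (out : Int) : Decidable (Spec_nearest_uniform_n_points n_obj target out) := by unfold Spec_nearest_uniform_n_points; infer_instance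

-- ===== CLAIM (what is proved, stated in full; the proofs are below) =====
def Claim_equal_nearest_uniform_n_points : Prop := ∀ (n_obj : Int) (target : Int), Dom_nearest_uniform_n_points n_obj target → Spec_nearest_uniform_n_points n_obj target (nearest_uniform_n_points n_obj target)

-- ===== LEMMAS AND PROOFS =====

-- the value computed at step p
def pvG (n_obj p : Int) : Int := pyComb (n_obj + p - 1) p

-- c is the first crossing point: least p in [1, 200] with target ≤ pvG n_obj p
def pvCross (n_obj target c : Int) : Prop :=
  1 ≤ c ∧ c ≤ 200 ∧ target ≤ pvG n_obj c ∧ ∀ q, 1 ≤ q → q < c → pvG n_obj q < target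

-- the fold step of PySem.List.min2? with A's key (abs(x - target), -x)
def pvMinStep (t : Int) (acc : Option Int) (x : Int) : Option Int :=
  match acc with
  | none => some x
  | some m => if (decide (|x - t| < |m - t|) || (!decide (|m - t| < |x - t|) && decide (-x < -m))) = true then some x else some m

lemma pvMin2_eq_foldl (t : Int) (xs : List Int) :
    PySem.List.min2? xs (fun y => |y - t|) (fun y => -y) = xs.foldl (pvMinStep t) none := by
  unfold PySem.List.min2? pvMinStep
  congr 1
  funext acc x
  cases acc <;> rfl

lemma pvMinStep_none (t x : Int) : pvMinStep t none x = some x := rfl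

-- both below target and m ≤ x: the larger (later) one wins
lemma pvMinStep_below (t m x : Int) (h1 : m < t) (h2 : x < t) (h3 : m ≤ x) :
    pvMinStep t (some m) x = some x := by
  have e1 : |x - t| = t - x := by rw [abs_of_nonpos (by omega)]; ring
  have e2 : |m - t| = t - m := by rw [abs_of_nonpos (by omega)]; ring
  simp only [pvMinStep, e1, e2]
  rcases eq_or_lt_of_le h3 with h | h
  · subst h; simp
  · have hx : t - x < t - m := by omega
    simp [hx]

-- m below target, x at/above target: x wins exactly when its distance is ≤ m's
lemma pvMinStep_cross (t m x : Int) (h1 : m < t) (h2 : t ≤ x) :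
    pvMinStep t (some m) x = if x - t ≤ t - m then some x else some m := by
  have e1 : |x - t| = x - t := abs_of_nonneg (by omega)
  have e2 : |m - t| = t - m := by rw [abs_of_nonpos (by omega)]; ring
  simp only [pvMinStep, e1, e2]
  by_cases hc : x - t ≤ t - m
  · rcases eq_or_lt_of_le hc with h | h
    · simp [h, show -x < -m by omega]
    · simp [hc, h]
  · simp [hc, show ¬ (x - t < t - m) by omega, show t - m < x - t by omega]

lemma pvG_lt_succ (n_obj p : Int) (hn : 2 ≤ n_obj) (hp : 1 ≤ p) :
    pvG n_obj p < pvG n_obj (p + 1) := by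
  unfold pvG pyComb
  have e1 : (n_obj + p - 1).toNat = n_obj.toNat + p.toNat - 1 := by omega
  have e2 : (n_obj + (p + 1) - 1).toNat = (n_obj.toNat + p.toNat - 1) + 1 := by omega
  have e3 : (p + 1).toNat = p.toNat + 1 := by omega
  rw [e1, e2, e3]
  have key : Nat.choose (n_obj.toNat + p.toNat - 1) p.toNat
      < Nat.choose ((n_obj.toNat + p.toNat - 1) + 1) (p.toNat + 1) := by
    rw [Nat.choose_succ_succ, Nat.succ_eq_add_one]
    have hpos : 0 < Nat.choose (n_obj.toNat + p.toNat - 1) (p.toNat + 1) :=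
      Nat.choose_pos (by omega)
    omega
  exact_mod_cast key

lemma pvG_mono (n_obj : Int) (hn : 2 ≤ n_obj) (p q : Int) (hp : 1 ≤ p) (hpq : p ≤ q) :
    pvG n_obj p ≤ pvG n_obj q := by
  have H : ∀ k : Nat, ∀ r : Int, 1 ≤ r → pvG n_obj r ≤ pvG n_obj (r + k) := by
    intro k
    induction k with
    | zero => intro r hr; simp
    | succ k ih =>
      intro r hr
      have h1 := ih r hr
      have h2 := pvG_lt_succ n_obj (r + k) hn (by omega)
      have e : r + ((k + 1 : Nat) : Int) = (r + k) + 1 := by push_cast; ring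
      rw [e]
      omega
  have e : q = p + ((q - p).toNat : Int) := by omega
  rw [e]
  exact H _ p hp

lemma pvBSearch_spec (n_obj t : Int) (hn : 2 ≤ n_obj) :
    ∀ (k : Nat) (lo hi : Int), (hi - lo).toNat = k → 1 ≤ lo → lo ≤ hi → hi ≤ 200 →
      t ≤ pvG n_obj hi → (∀ q, 1 ≤ q → q < lo → pvG n_obj q < t) →
      pvCross n_obj t (pvBSearch n_obj t lo hi) := by
  intro k
  induction k using Nat.strong_induction_on with
  | _ k ih =>
    intro lo hi hk h1 h2 h3 h4 h5
    rw [pvBSearch]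
    by_cases hlh : lo < hi
    · rw [dif_pos hlh]
      have hb := PySem.Int.floordiv_two_mid_bounds (le_of_lt hlh)
      have hltm : PySem.Int.floordiv (lo + hi) 2 < hi :=
        (PySem.Int.floordiv_lt_iff_lt_mul (by norm_num)).2 (by omega)
      set mid := PySem.Int.floordiv (lo + hi) 2 with hmid
      show pvCross n_obj t
        (if t ≤ pyComb (n_obj + mid - 1) mid then pvBSearch n_obj t lo mid
         else pvBSearch n_obj t (mid + 1) hi)
      by_cases hc : t ≤ pyComb (n_obj + mid - 1) mid
      · rw [if_pos hc]
        exact ih ((mid - lo).toNat) (by omega) lo mid rfl h1 (by omega) (by omega) hc h5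
      · rw [if_neg hc]
        have hmidlt : pvG n_obj mid < t := not_le.1 hc
        refine ih ((hi - (mid + 1)).toNat) (by omega) (mid + 1) hi rfl (by omega) (by omega) h3 h4 ?_
        intro q hq1 hq2
        by_cases hql : q < lo
        · exact h5 q hq1 hql
        · have := pvG_mono n_obj hn q mid hq1 (by omega)
          omega
    · rw [dif_neg hlh]
      have he : lo = hi := by omega
      exact ⟨h1, by omega, by rw [he]; exact h4, fun q hq1 hq2 => h5 q hq1 hq2⟩

lemma pvCombVals_append (n_obj t : Int) :
    ∀ (k : Nat) (p : Int) (acc : List Int), (201 - p).toNat = k →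
      pvCombVals n_obj t p acc = acc ++ pvCombVals n_obj t p [] := by
  intro k
  induction k using Nat.strong_induction_on with
  | _ k ih =>
    intro p acc hk
    rw [pvCombVals, pvCombVals]
    by_cases hp : p ≤ 200
    · rw [dif_pos hp, dif_pos hp]
      show (if t ≤ pyComb (n_obj + p - 1) p then acc ++ [pyComb (n_obj + p - 1) p]
            else pvCombVals n_obj t (p + 1) (acc ++ [pyComb (n_obj + p - 1) p])) =
          acc ++ (if t ≤ pyComb (n_obj + p - 1) p then [] ++ [pyComb (n_obj + p - 1) p]
            else pvCombVals n_obj t (p + 1) ([] ++ [pyComb (n_obj + p - 1) p]))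
      by_cases hc : t ≤ pyComb (n_obj + p - 1) p
      · rw [if_pos hc, if_pos hc]
        simp
      · rw [if_neg hc, if_neg hc]
        rw [ih ((201 - (p + 1)).toNat) (by omega) (p + 1) (acc ++ [pyComb (n_obj + p - 1) p]) rfl]
        rw [ih ((201 - (p + 1)).toNat) (by omega) (p + 1) ([] ++ [pyComb (n_obj + p - 1) p]) rfl]
        simp
    · rw [dif_neg hp, dif_neg hp]
      simp
  
lemma pvCombVals_cons (n_obj t p : Int) (hp : p ≤ 200) :
    pvCombVals n_obj t p [] =
      pvG n_obj p :: (if t ≤ pvG n_obj p then [] else pvCombVals n_obj t (p + 1) []) := by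
  rw [pvCombVals, dif_pos hp]
  unfold pvG
  show (if t ≤ pyComb (n_obj + p - 1) p then [] ++ [pyComb (n_obj + p - 1) p]
        else pvCombVals n_obj t (p + 1) ([] ++ [pyComb (n_obj + p - 1) p])) =
      pyComb (n_obj + p - 1) p ::
        (if t ≤ pyComb (n_obj + p - 1) p then [] else pvCombVals n_obj t (p + 1) [])
  by_cases hc : t ≤ pyComb (n_obj + p - 1) p
  · rw [if_pos hc, if_pos hc]; rfl
  · rw [if_neg hc, if_neg hc]
    rw [pvCombVals_append n_obj t ((201 - (p + 1)).toNat) (p + 1) _ rfl]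
    rfl

-- crossing case: folding A's min step over the values produced from step p onward
lemma pvFoldCross (n_obj t c : Int) (hn : 2 ≤ n_obj) (hcr : pvCross n_obj t c) :
    ∀ (k : Nat) (p : Int), (c - p).toNat = k → 1 ≤ p → p ≤ c → ∀ m : Int, m < t → m ≤ pvG n_obj p →
      List.foldl (pvMinStep t) (some m) (pvCombVals n_obj t p []) =
        some (if p = c then (if pvG n_obj c - t ≤ t - m then pvG n_obj c else m)
              else (if pvG n_obj c - t ≤ t - pvG n_obj (c - 1) then pvG n_obj c else pvG n_obj (c - 1))) := by
  obtain ⟨hc1, hc2, hc3, hc4⟩ := hcr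
  intro k
  induction k using Nat.strong_induction_on with
  | _ k ih =>
    intro p hk hp1 hpc m hm hmle
    by_cases hpe : p = c
    · subst hpe
      rw [pvCombVals_cons n_obj t p (by omega), if_pos hc3]
      rw [List.foldl_cons, List.foldl_nil, pvMinStep_cross t m (pvG n_obj p) hm hc3]
      rw [if_pos rfl]
      split_ifs <;> rfl
    · have hplt : p < c := by omega
      have hgp : pvG n_obj p < t := hc4 p hp1 hplt
      rw [pvCombVals_cons n_obj t p (by omega), if_neg (not_le.2 hgp)]
      rw [List.foldl_cons, pvMinStep_below t m (pvG n_obj p) hm hgp hmle]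
      rw [ih ((c - (p + 1)).toNat) (by omega) (p + 1) rfl (by omega) (by omega) (pvG n_obj p) hgp
        (le_of_lt (pvG_lt_succ n_obj p hn hp1))]
      by_cases h2 : p + 1 = c
      · have hpe' : p = c - 1 := by omega
        rw [if_pos h2, if_neg hpe, hpe']
      · rw [if_neg h2, if_neg hpe]

-- fallback case: every value up to p = 200 stays below target; the fold keeps the last one
lemma pvFoldAll (n_obj t : Int) (hn : 2 ≤ n_obj)
    (hall : ∀ q, 1 ≤ q → q ≤ 200 → pvG n_obj q < t) :
    ∀ (k : Nat) (p : Int), (200 - p).toNat = k → 1 ≤ p → p ≤ 200 → ∀ m : Int, m < t → m ≤ pvG n_obj p →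
      List.foldl (pvMinStep t) (some m) (pvCombVals n_obj t p []) = some (pvG n_obj 200) := by
  intro k
  induction k using Nat.strong_induction_on with
  | _ k ih =>
    intro p hk hp1 hp2 m hm hmle
    by_cases hpe : p = 200
    · subst hpe
      have hgp : pvG n_obj 200 < t := hall 200 (by omega) (by omega)
      rw [pvCombVals_cons n_obj t 200 (by omega), if_neg (not_le.2 hgp)]
      have hstop : pvCombVals n_obj t (200 + 1) [] = [] := by
        rw [pvCombVals]
        norm_num
      rw [hstop, List.foldl_cons, List.foldl_nil,
        pvMinStep_below t m (pvG n_obj 200) hm hgp hmle]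
    · have hgp : pvG n_obj p < t := hall p hp1 (by omega)
      rw [pvCombVals_cons n_obj t p (by omega), if_neg (not_le.2 hgp)]
      rw [List.foldl_cons, pvMinStep_below t m (pvG n_obj p) hm hgp hmle]
      exact ih ((200 - (p + 1)).toNat) (by omega) (p + 1) rfl (by omega) (by omega) (pvG n_obj p)
        hgp (le_of_lt (pvG_lt_succ n_obj p hn hp1))

lemma pvG200 (n_obj : Int) : pvG n_obj 200 = pyComb (n_obj + 199) 200 := by
  unfold pvG
  rw [show n_obj + 200 - 1 = n_obj + 199 by ring]

-- ===== VERDICT (by name: the statement is the Claim_ definition above) =====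
theorem nearest_uniform_n_points_spec : Claim_equal_nearest_uniform_n_points := by
  intro n_obj target _hdom
  unfold Spec_nearest_uniform_n_points
  by_cases hn : n_obj ≤ 1
  · simp only [nearest_uniform_n_points, nearest_uniform_n_points_alt, if_pos hn]
  · have hn2 : 2 ≤ n_obj := by omega
    simp only [nearest_uniform_n_points, nearest_uniform_n_points_alt, if_neg hn]
    rw [pvMin2_eq_foldl]
    by_cases hfb : pyComb (n_obj + 199) 200 < target
    · -- no crossing within 200 steps
      rw [if_pos hfb]
      have hall : ∀ q, 1 ≤ q → q ≤ 200 → pvG n_obj q < target := by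
        intro q h1 h2
        have := pvG_mono n_obj hn2 q 200 h1 h2
        rw [pvG200] at this
        omega
      have hg1 : pvG n_obj 1 < target := hall 1 (by omega) (by omega)
      rw [pvCombVals_cons n_obj target 1 (by omega), if_neg (not_le.2 hg1)]
      rw [List.foldl_cons, pvMinStep_none, show (1 : Int) + 1 = 2 by norm_num]
      rw [pvFoldAll n_obj target hn2 hall ((200 - 2 : Int)).toNat 2 rfl (by omega) (by omega)
        (pvG n_obj 1) hg1 (le_of_lt (pvG_lt_succ n_obj 1 hn2 (by omega)))]
      rw [pvG200]
      rfl
    · rw [if_neg hfb]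
      have hcr : pvCross n_obj target (pvBSearch n_obj target 1 200) := by
        apply pvBSearch_spec n_obj target hn2 ((200 - 1 : Int)).toNat 1 200 rfl (by omega)
          (by omega) (by omega)
        · rw [pvG200]; omega
        · intro q h1 h2; omega
      set c := pvBSearch n_obj target 1 200 with hcdef
      obtain ⟨hc1, hc2, hc3, hc4⟩ := hcr
      by_cases hce : c = 1
      · rw [hce] at hc3 ⊢
        rw [pvCombVals_cons n_obj target 1 (by omega), if_pos hc3]
        rw [List.foldl_cons, List.foldl_nil, pvMinStep_none, if_pos rfl]
        rfl
      · have hc2' : 2 ≤ c := by omega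
        have hg1 : pvG n_obj 1 < target := hc4 1 (by omega) (by omega)
        rw [pvCombVals_cons n_obj target 1 (by omega), if_neg (not_le.2 hg1)]
        rw [List.foldl_cons, pvMinStep_none, show (1 : Int) + 1 = 2 by norm_num]
        rw [pvFoldCross n_obj target c hn2 ⟨hc1, hc2, hc3, hc4⟩ ((c - 2).toNat) 2 rfl (by omega)
          (by omega) (pvG n_obj 1) hg1 (le_of_lt (pvG_lt_succ n_obj 1 hn2 (by omega)))]
        have hres : (if (2 : Int) = c then (if pvG n_obj c - target ≤ target - pvG n_obj 1 then pvG n_obj c else pvG n_obj 1)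
              else (if pvG n_obj c - target ≤ target - pvG n_obj (c - 1) then pvG n_obj c else pvG n_obj (c - 1)))
            = (if pvG n_obj c - target ≤ target - pvG n_obj (c - 1) then pvG n_obj c else pvG n_obj (c - 1)) := by
          by_cases h2c : (2 : Int) = c
          · rw [if_pos h2c, show c - 1 = 1 by omega]
          · rw [if_neg h2c]
        rw [hres, if_neg hce]
        have hprev : pyComb (n_obj + c - 2) (c - 1) = pvG n_obj (c - 1) := by
          unfold pvG
          rw [show n_obj + (c - 1) - 1 = n_obj + c - 2 by ring]
        have hcur : pyComb (n_obj + c - 1) c = pvG n_obj c := rfl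
        rw [hprev, hcur]
        have hprevlt : pvG n_obj (c - 1) < target := hc4 (c - 1) (by omega) (by omega)
        have ea : |pvG n_obj (c - 1) - target| = target - pvG n_obj (c - 1) := by
          rw [abs_of_nonpos (by omega)]; ring
        have eb : |pvG n_obj c - target| = pvG n_obj c - target := abs_of_nonneg (by omega)
        rw [ea, eb]
        by_cases hx : pvG n_obj c - target ≤ target - pvG n_obj (c - 1)
        · rw [if_pos hx, if_neg (by omega : ¬ (target - pvG n_obj (c - 1) < pvG n_obj c - target))]
          simp
        · rw [if_neg hx, if_pos (by omega : target - pvG n_obj (c - 1) < pvG n_obj c - target)]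
          simp
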